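-- pv_equiv track=rewrite | github.com/Adv20202/PrimeSpecPCR | 2_MSA_Alignment.py | format_blast_like_alignment
-- ===== SOURCE A (Python) =====
-- from typing import List, Tuple, Optional, Dict
--
-- def format_blast_like_alignment(aligned_sequences: List[Tuple[str, str]], block_size: int = 60) -> str:
--     """Format alignment in BLAST-like output with dots for matching residues."""
--     if not aligned_sequences:
--         return ""
--
--     # Get the reference sequence (first in list)
--     ref_id, ref_seq = aligned_sequences[0]
--
--     # Adjust sequences to the same length if needed
--     max_len = max(len(seq) for _, seq in aligned_sequences)
--     ref_seq = ref_seq.ljust(max_len, '-')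
--
--     # Format the alignment in blocks
--     result = []
--     sequence_positions = {ref_id: 0}
--
--     for start_pos in range(0, len(ref_seq), block_size):
--         end_pos = min(start_pos + block_size, len(ref_seq))
--
--         # Count non-gap characters in the reference segment
--         ref_segment = ref_seq[start_pos:end_pos]
--         non_gap_count_ref = sum(1 for c in ref_segment if c != '-')
--
--         # Calculate query positions
--         if ref_id not in sequence_positions:
--             sequence_positions[ref_id] = 0
--         query_start_pos = sequence_positions[ref_id] + 1
--         query_end_pos = query_start_pos + non_gap_count_ref - 1
--         sequence_positions[ref_id] += non_gap_count_ref
--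
--         # Add the reference sequence block
--         result.append(f"{ref_id} {query_start_pos:<3} {ref_segment} {query_end_pos}")
--
--         # Add each subject sequence with dots for matches
--         for seq_id, seq in aligned_sequences[1:]:
--             if seq_id not in sequence_positions:
--                 sequence_positions[seq_id] = 0
--
--             # Ensure sequence is long enough
--             seq = seq.ljust(max_len, '-')
--
--             # Extract segment
--             subj_segment = seq[start_pos:end_pos]
--
--             # Count non-gap characters for position calculation
--             non_gap_count_subj = sum(1 for c in subj_segment if c != '-')
--
--             subj_start_pos = sequence_positions[seq_id] + 1
--             subj_end_pos = subj_start_pos + non_gap_count_subj - 1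
--             if non_gap_count_subj == 0:  # Handle case with only gaps
--                 subj_end_pos = subj_start_pos
--             sequence_positions[seq_id] += non_gap_count_subj
--
--             # Create formatted segment with appropriate notation
--             formatted_segment = ""
--             for i in range(len(subj_segment)):
--                 if i < len(ref_segment):
--                     # Only show a dot if the nucleotides match and both are not gaps
--                     if ref_segment[i] == subj_segment[i] and ref_segment[i] != '-' and subj_segment[i] != '-':
--                         formatted_segment += "."  # Match - use a dot
--                     else:
--                         formatted_segment += subj_segment[i]  # Mismatch - show the actual nucleotide
--                 else:
--                     formatted_segment += " "  # Padding if subject is shorter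
--
--             # Add the subject line
--             result.append(f"{seq_id:<10} {subj_start_pos:<3} {formatted_segment} {subj_end_pos}")
--
--         result.append("")  # Empty line between blocks
--
--     return '\n'.join(result)
-- ===== SOURCE B (Python) =====
-- from typing import List, Tuple
--
-- def format_blast_like_alignment(aligned_sequences: List[Tuple[str, str]], block_size: int = 60) -> str:
--     """Two-pass variant: precompute padded strings, full dot-strings and non-gap
--     prefix sums once, then emit blocks by slicing and prefix-sum differences."""
--     if not aligned_sequences:
--         return ""
--     ref_id = aligned_sequences[0][0]
--     max_len = max(len(seq) for _, seq in aligned_sequences)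
--     ref = aligned_sequences[0][1].ljust(max_len, '-')
--
--     def prefix_counts(s):
--         pref = [0]
--         for c in s:
--             pref.append(pref[-1] + (1 if c != '-' else 0))
--         return pref
--
--     ref_pref = prefix_counts(ref)
--     subjects = []
--     for seq_id, seq in aligned_sequences[1:]:
--         s = seq.ljust(max_len, '-')
--         dots = ''.join('.' if a == b and a != '-' else b for a, b in zip(ref, s))
--         subjects.append((seq_id, dots, prefix_counts(s)))
--
--     result = []
--     positions = {ref_id: 0}
--     for start in range(0, max_len, block_size):
--         end = min(start + block_size, max_len)
--         n_ref = ref_pref[end] - ref_pref[start]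
--         qs = positions[ref_id] + 1
--         positions[ref_id] += n_ref
--         result.append(f"{ref_id} {qs:<3} {ref[start:end]} {qs + n_ref - 1}")
--         for seq_id, dots, pref in subjects:
--             if seq_id not in positions:
--                 positions[seq_id] = 0
--             n = pref[end] - pref[start]
--             ss = positions[seq_id] + 1
--             se = ss + n - 1 if n else ss
--             positions[seq_id] += n
--             result.append(f"{seq_id:<10} {ss:<3} {dots[start:end]} {se}")
--         result.append("")
--     return '\n'.join(result)
-- ===== Notes on version B (the rewrite author's own statement) =====
-- stated objective: alternative
-- what changed: B precomputes in one pass each padded sequence's full dot-string and a prefix-sum array of non-gap counts, then emits blocks by slicing those strings and taking prefix-sum differences, instead of A's per-block re-padding, per-character dot loop and per-segment recount.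
-- outside the precondition, e.g. on format_blast_like_alignment([('r', 'AC')], 0): A raises ValueError, B raises ValueError
import Mathlib
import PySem

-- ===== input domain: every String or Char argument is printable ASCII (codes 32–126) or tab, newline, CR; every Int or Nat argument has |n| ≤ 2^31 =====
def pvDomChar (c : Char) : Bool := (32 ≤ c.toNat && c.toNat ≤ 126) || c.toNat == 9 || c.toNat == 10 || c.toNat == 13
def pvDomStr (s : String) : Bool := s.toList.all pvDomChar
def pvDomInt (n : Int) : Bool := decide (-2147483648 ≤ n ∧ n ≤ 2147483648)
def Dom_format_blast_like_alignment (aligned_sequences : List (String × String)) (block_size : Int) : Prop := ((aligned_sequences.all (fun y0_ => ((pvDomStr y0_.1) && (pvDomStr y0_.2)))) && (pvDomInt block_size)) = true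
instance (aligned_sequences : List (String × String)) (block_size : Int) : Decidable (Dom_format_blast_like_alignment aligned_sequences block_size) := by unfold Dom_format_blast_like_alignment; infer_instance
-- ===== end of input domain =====

-- B is a two-pass re-implementation (precomputed dot-strings and non-gap prefix sums, blocks emitted by slicing);
-- objective: alternative decomposition of the same formatting task; equivalence proved on block_size ≠ 0 (A raises ValueError at 0).

-- shared formatting helpers (Python's str.ljust and the f-string paddings, used verbatim by both programs)
def pvLjust (cs : List Char) (n : Int) (c : Char) : List Char :=
  cs ++ List.replicate (n.toNat - cs.length) c
-- f"{n:<3}"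
def pvPad3 (n : Int) : List Char :=
  PySem.Int.toChars n ++ List.replicate (3 - (PySem.Int.toChars n).length) ' '
-- f"{s:<10}"
def pvPad10 (cs : List Char) : List Char :=
  cs ++ List.replicate (10 - cs.length) ' '

-- ===== PORT A =====
-- state: (result lines, sequence_positions)
def pvStateTy : Type := List (List Char) × PySem.Dict String Int

-- body of A's inner `for seq_id, seq in aligned_sequences[1:]` loop
def pvSubjA (max_len start_pos end_pos : Int) (ref_segment : List Char)
    (st : pvStateTy) (p : String × String) : pvStateTy :=
  let seq_id := p.1
  let positions := if st.2.contains seq_id then st.2 else st.2.insert seq_id 0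
  let seq := pvLjust p.2.toList max_len '-'
  let subj_segment := PySem.List.slice seq (some start_pos) (some end_pos)
  let non_gap_count_subj : Int := (subj_segment.map (fun c => if c ≠ '-' then (1 : Int) else 0)).sum
  let subj_start_pos := positions.getD seq_id 0 + 1
  let subj_end_pos := subj_start_pos + non_gap_count_subj - 1
  let subj_end_pos := if non_gap_count_subj == 0 then subj_start_pos else subj_end_pos
  let positions := positions.insert seq_id (positions.getD seq_id 0 + non_gap_count_subj)
  -- formatted_segment: index loop with the `i < len(ref_segment)` guard (indices are in range: both pyGetD defaults are never used)
  let formatted_segment := (PySem.List.pyRange 0 (PySem.List.len subj_segment) 1).foldl (fun acc i =>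
    if i < PySem.List.len ref_segment then
      if PySem.List.pyGetD ref_segment i ' ' = PySem.List.pyGetD subj_segment i ' ' ∧
         PySem.List.pyGetD ref_segment i ' ' ≠ '-' ∧ PySem.List.pyGetD subj_segment i ' ' ≠ '-' then
        acc ++ ['.']
      else acc ++ [PySem.List.pyGetD subj_segment i ' ']
    else acc ++ [' ']) []
  (st.1 ++ [pvPad10 seq_id.toList ++ [' '] ++ pvPad3 subj_start_pos ++ [' '] ++ formatted_segment ++ [' '] ++ PySem.Int.toChars subj_end_pos],
   positions)

-- body of A's outer `for start_pos in range(0, len(ref_seq), block_size)` loop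
def pvBlockA (ref_id : String) (ref_seq : List Char) (rest : List (String × String))
    (max_len block_size : Int) (st : pvStateTy) (start_pos : Int) : pvStateTy :=
  let end_pos := min (start_pos + block_size) (PySem.List.len ref_seq)
  let ref_segment := PySem.List.slice ref_seq (some start_pos) (some end_pos)
  let non_gap_count_ref : Int := (ref_segment.map (fun c => if c ≠ '-' then (1 : Int) else 0)).sum
  let positions := if st.2.contains ref_id then st.2 else st.2.insert ref_id 0
  let query_start_pos := positions.getD ref_id 0 + 1
  let query_end_pos := query_start_pos + non_gap_count_ref - 1
  let positions := positions.insert ref_id (positions.getD ref_id 0 + non_gap_count_ref)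
  let result := st.1 ++ [ref_id.toList ++ [' '] ++ pvPad3 query_start_pos ++ [' '] ++ ref_segment ++ [' '] ++ PySem.Int.toChars query_end_pos]
  let st2 := rest.foldl (pvSubjA max_len start_pos end_pos ref_segment) (result, positions)
  (st2.1 ++ [[]], st2.2)

def format_blast_like_alignment (aligned_sequences : List (String × String)) (block_size : Int) : String :=
  match aligned_sequences with
  | [] => ""
  | (ref_id, ref_seq0) :: rest =>
    -- max(len(seq) for _, seq in aligned_sequences) over the nonempty list
    let max_len : Int := (rest.map (fun p => PySem.Str.len p.2)).foldl max (PySem.Str.len ref_seq0)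
    let ref_seq := pvLjust ref_seq0.toList max_len '-'
    let res := (PySem.List.pyRange 0 (PySem.List.len ref_seq) block_size).foldl
      (pvBlockA ref_id ref_seq rest max_len block_size) ([], (PySem.Dict.empty).insert ref_id 0)
    String.ofList (PySem.Chars.join ['\n'] res.1)

-- ===== PORT B =====
-- pref[i] = number of non-gap characters among the first i characters (built once per sequence)
def pvPrefixCounts (s : List Char) : List Int :=
  s.foldl (fun pref c => pref ++ [PySem.List.pyGetD pref (-1) 0 + (if c ≠ '-' then 1 else 0)]) [(0 : Int)]

-- full dot-string over the whole alignment: '.' where ref and subject agree on a non-gap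
def pvDots (ref s : List Char) : List Char :=
  List.zipWith (fun a b => if a = b ∧ a ≠ '-' then '.' else b) ref s

-- body of B's emission loop over one precomputed subject (seq_id, dots, pref)
def pvSubjB (start_ end_ : Int) (st : pvStateTy) (t : String × List Char × List Int) : pvStateTy :=
  let positions := if st.2.contains t.1 then st.2 else st.2.insert t.1 0
  let n := PySem.List.pyGetD t.2.2 end_ 0 - PySem.List.pyGetD t.2.2 start_ 0
  let ss := positions.getD t.1 0 + 1
  let se := if n ≠ 0 then ss + n - 1 else ss
  (st.1 ++ [pvPad10 t.1.toList ++ [' '] ++ pvPad3 ss ++ [' '] ++ PySem.List.slice t.2.1 (some start_) (some end_) ++ [' '] ++ PySem.Int.toChars se],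
   positions.insert t.1 (positions.getD t.1 0 + n))

-- body of B's block-boundary loop
def pvBlockB (ref_id : String) (ref : List Char) (ref_pref : List Int)
    (subjects : List (String × List Char × List Int)) (max_len block_size : Int)
    (st : pvStateTy) (start_ : Int) : pvStateTy :=
  let end_ := min (start_ + block_size) max_len
  let n_ref := PySem.List.pyGetD ref_pref end_ 0 - PySem.List.pyGetD ref_pref start_ 0
  let qs := st.2.getD ref_id 0 + 1
  let positions := st.2.insert ref_id (st.2.getD ref_id 0 + n_ref)
  let result := st.1 ++ [ref_id.toList ++ [' '] ++ pvPad3 qs ++ [' '] ++ PySem.List.slice ref (some start_) (some end_) ++ [' '] ++ PySem.Int.toChars (qs + n_ref - 1)]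
  let st2 := subjects.foldl (pvSubjB start_ end_) (result, positions)
  (st2.1 ++ [[]], st2.2)

def format_blast_like_alignment_alt (aligned_sequences : List (String × String)) (block_size : Int) : String :=
  match aligned_sequences with
  | [] => ""
  | (ref_id, ref_seq0) :: rest =>
    let max_len : Int := (rest.map (fun p => PySem.Str.len p.2)).foldl max (PySem.Str.len ref_seq0)
    let ref := pvLjust ref_seq0.toList max_len '-'
    let ref_pref := pvPrefixCounts ref
    let subjects := rest.map (fun p =>
      let s := pvLjust p.2.toList max_len '-'
      (p.1, pvDots ref s, pvPrefixCounts s))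
    let res := (PySem.List.pyRange 0 max_len block_size).foldl
      (pvBlockB ref_id ref ref_pref subjects max_len block_size) ([], (PySem.Dict.empty).insert ref_id 0)
    String.ofList (PySem.Chars.join ['\n'] res.1)

-- ===== PRECONDITION & SPEC =====
-- Pre_ excludes only block_size = 0 with a nonempty alignment, where Python A raises ValueError (range() with zero step).
def Pre_format_blast_like_alignment (aligned_sequences : List (String × String)) (block_size : Int) : Prop :=
  aligned_sequences = [] ∨ block_size ≠ 0
instance (aligned_sequences : List (String × String)) (block_size : Int) : Decidable (Pre_format_blast_like_alignment aligned_sequences block_size) := by unfold Pre_format_blast_like_alignment; infer_instance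

def pvWitness_format_blast_like_alignment : (List (String × String)) × Int :=
  ([("ref", "ACG-T"), ("s1", "AC--T"), ("s1", "AAA")], 3)

def Spec_format_blast_like_alignment (aligned_sequences : List (String × String)) (block_size : Int) (out : String) : Prop := out = format_blast_like_alignment_alt aligned_sequences block_size
instance (aligned_sequences : List (String × String)) (block_size : Int) (out : String) : Decidable (Spec_format_blast_like_alignment aligned_sequences block_size out) := by unfold Spec_format_blast_like_alignment; infer_instance

-- ===== CLAIM (what is proved, stated in full; the proofs are below) =====
def Claim_equal_format_blast_like_alignment : Prop := ∀ (aligned_sequences : List (String × String)) (block_size : Int), Dom_format_blast_like_alignment aligned_sequences block_size → Pre_format_blast_like_alignment aligned_sequences block_size → Spec_format_blast_like_alignment aligned_sequences block_size (format_blast_like_alignment aligned_sequences block_size)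

-- ===== LEMMAS AND PROOFS =====

-- non-gap count as an Int (proof-side abbreviation)
def pvCnt (l : List Char) : Int := (l.countP (fun c => decide (c ≠ '-')) : Nat)

theorem pvTab (done : List Char) :
    (List.range (done.length + 1)).map (fun i => pvCnt (done.take i))
      = (List.range done.length).map (fun i => pvCnt (done.take i)) ++ [pvCnt done] := by
  rw [List.range_succ, List.map_append]
  simp

theorem pvPrefAux (s : List Char) : ∀ done : List Char,
    s.foldl (fun pref c => pref ++ [PySem.List.pyGetD pref (-1) 0 + (if c ≠ '-' then 1 else 0)])
      ((List.range (done.length + 1)).map (fun i => pvCnt (done.take i)))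
    = (List.range ((done ++ s).length + 1)).map (fun i => pvCnt ((done ++ s).take i)) := by
  induction s with
  | nil => intro done; simp
  | cons c s' ih =>
    intro done
    have hstep : ((List.range (done.length + 1)).map (fun i => pvCnt (done.take i)))
        ++ [PySem.List.pyGetD ((List.range (done.length + 1)).map (fun i => pvCnt (done.take i))) (-1) 0 + (if c ≠ '-' then 1 else 0)]
      = (List.range ((done ++ [c]).length + 1)).map (fun i => pvCnt ((done ++ [c]).take i)) := by
      rw [pvTab done, PySem.List.pyGetD_neg_one_append_singleton]
      have h2 : (List.range ((done ++ [c]).length + 1)).map (fun i => pvCnt ((done ++ [c]).take i))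
          = (List.range ((done ++ [c]).length)).map (fun i => pvCnt ((done ++ [c]).take i)) ++ [pvCnt (done ++ [c])] := by
        rw [pvTab (done ++ [c])]
      rw [h2]
      congr 1
      · -- maps over range (done.length+1) agree since take i (done++[c]) = take i done for i ≤ done.length
        simp only [List.length_append, List.length_singleton]
        rw [List.range_succ, List.map_append]
        congr 1
        · apply List.map_congr_left
          intro i hi
          rw [List.mem_range] at hi
          rw [List.take_append_of_le_length (by omega)]
        · simp
      · simp [pvCnt, List.countP_append, List.countP_cons]
    rw [List.foldl_cons, hstep, ih (done ++ [c])]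
    simp

theorem pvPrefixCounts_eq (s : List Char) :
    pvPrefixCounts s = (List.range (s.length + 1)).map (fun i => pvCnt (s.take i)) := by
  have := pvPrefAux s []
  simpa [pvPrefixCounts, pvCnt] using this

theorem pvCountSlice (s : List Char) (a b : Int) (h0 : 0 ≤ a) (hab : a ≤ b) (hb : b ≤ (s.length : Int)) :
    ((PySem.List.slice s (some a) (some b)).map (fun c => if c ≠ '-' then (1 : Int) else 0)).sum
      = PySem.List.pyGetD (pvPrefixCounts s) b 0 - PySem.List.pyGetD (pvPrefixCounts s) a 0 := by
  rw [PySem.List.slice_toNat s h0 (le_trans h0 hab), pvPrefixCounts_eq]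
  have hlen : ((List.range (s.length + 1)).map (fun i => pvCnt (s.take i))).length = s.length + 1 := by simp
  rw [PySem.List.pyGetD_eq_getElem _ _ (le_trans h0 hab) (by rw [hlen]; omega),
      PySem.List.pyGetD_eq_getElem _ _ h0 (by rw [hlen]; omega)]
  simp only [List.getElem_map, List.getElem_range]
  have hsum := PySem.List.sum_map_ite_one_zero (fun c => decide (c ≠ '-')) (List.take (b.toNat - a.toNat) (List.drop a.toNat s))
  simp only [decide_eq_true_eq] at hsum
  rw [hsum]
  have hb' : b.toNat = a.toNat + (b.toNat - a.toNat) := by omega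
  unfold pvCnt
  rw [hb', List.take_add, List.countP_append]
  push_cast
  have h3 : a.toNat + (b.toNat - a.toNat) - a.toNat = b.toNat - a.toNat := by omega
  rw [h3]
  ring

theorem pvDotsMap (R S : List Char) (h : R.length = S.length) :
    (PySem.List.pyRange 0 (PySem.List.len S) 1).foldl (fun acc i =>
      if i < PySem.List.len R then
        if PySem.List.pyGetD R i ' ' = PySem.List.pyGetD S i ' ' ∧
           PySem.List.pyGetD R i ' ' ≠ '-' ∧ PySem.List.pyGetD S i ' ' ≠ '-' then
          acc ++ ['.']
        else acc ++ [PySem.List.pyGetD S i ' ']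
      else acc ++ [' ']) []
    = pvDots R S := by
  rw [PySem.List.foldl_congr_mem' _ _
    (fun acc i => acc ++ [if PySem.List.pyGetD R i ' ' = PySem.List.pyGetD S i ' ' ∧
           PySem.List.pyGetD R i ' ' ≠ '-' ∧ PySem.List.pyGetD S i ' ' ≠ '-' then '.'
           else PySem.List.pyGetD S i ' ']) _ (by
      intro i hi acc
      rw [PySem.List.mem_pyRange_one] at hi
      have hiR : i < PySem.List.len R := by
        simp only [PySem.List.len_eq] at *; omega
      rw [if_pos hiR]
      by_cases hc : PySem.List.pyGetD R i ' ' = PySem.List.pyGetD S i ' ' ∧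
           PySem.List.pyGetD R i ' ' ≠ '-' ∧ PySem.List.pyGetD S i ' ' ≠ '-'
      · simp only [if_pos hc]
      · simp only [if_neg hc])]
  rw [PySem.List.foldl_append_singleton_eq_map, List.nil_append, PySem.List.len_eq,
      PySem.List.pyRange_one, List.map_map]
  apply List.ext_getElem
  · simp [pvDots, h]
  · intro i h1 h2
    simp only [List.getElem_map, List.getElem_range, Function.comp_apply]
    have hiS : i < S.length := by simpa using h1
    have hiR : i < R.length := by omega
    rw [PySem.List.pyGetD_eq_getElem R _ (by omega) (by omega),
        PySem.List.pyGetD_eq_getElem S _ (by omega) (by omega)]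
    simp only [zero_add, Int.toNat_natCast, pvDots, List.getElem_zipWith]
    by_cases hA : R[i] = S[i] ∧ ¬R[i] = '-'
    · rw [if_pos ⟨hA.1, hA.2, hA.1 ▸ hA.2⟩, if_pos hA]
    · rw [if_neg (fun hc => hA ⟨hc.1, hc.2.1⟩), if_neg hA]

theorem pvSliceDots (R S : List Char) (a b : Int) (h0 : 0 ≤ a) (h1 : 0 ≤ b) :
    PySem.List.slice (pvDots R S) (some a) (some b)
      = pvDots (PySem.List.slice R (some a) (some b)) (PySem.List.slice S (some a) (some b)) := by
  simp only [pvDots, PySem.List.slice_toNat _ h0 h1, List.drop_zipWith, List.take_zipWith]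

theorem pvSubj_eq (max_len start_ end_ : Int) (ref : List Char)
    (href : (ref.length : Int) = max_len)
    (h0 : 0 ≤ start_) (hse : start_ ≤ end_) (he : end_ ≤ max_len)
    (p : String × String) (hp : PySem.Str.len p.2 ≤ max_len) (st : pvStateTy) :
    pvSubjA max_len start_ end_ (PySem.List.slice ref (some start_) (some end_)) st p
      = pvSubjB start_ end_ st
          (p.1, pvDots ref (pvLjust p.2.toList max_len '-'), pvPrefixCounts (pvLjust p.2.toList max_len '-')) := by
  have hml : 0 ≤ max_len := le_trans (le_trans h0 hse) he
  set seq := pvLjust p.2.toList max_len '-' with hseq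
  have hslen : (seq.length : Int) = max_len := by
    rw [hseq]
    simp only [pvLjust, List.length_append, List.length_replicate]
    rw [PySem.Str.len_eq] at hp
    push_cast
    omega
  have hll : ref.length = seq.length := by
    have : (ref.length : Int) = (seq.length : Int) := by rw [href, hslen]
    exact_mod_cast this
  have hcount := pvCountSlice seq start_ end_ h0 hse (by rw [hslen]; exact he)
  have hlenslice : (PySem.List.slice ref (some start_) (some end_)).length
      = (PySem.List.slice seq (some start_) (some end_)).length := by
    rw [PySem.List.length_slice, PySem.List.length_slice, hll]
  simp only [pvSubjA, pvSubjB]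
  rw [hcount, pvDotsMap _ _ hlenslice, ← pvSliceDots ref seq start_ end_ h0 (le_trans h0 hse)]
  by_cases hn : PySem.List.pyGetD (pvPrefixCounts seq) end_ 0 - PySem.List.pyGetD (pvPrefixCounts seq) start_ 0 = 0 <;>
    simp [hn]

theorem pvBlock_eq (ref_id : String) (ref : List Char) (rest : List (String × String))
    (max_len block_size : Int)
    (href : (ref.length : Int) = max_len)
    (hrest : ∀ p ∈ rest, PySem.Str.len p.2 ≤ max_len)
    (st : pvStateTy) (start_ : Int)
    (hs : start_ ∈ PySem.List.pyRange 0 max_len block_size) :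
    pvBlockA ref_id ref rest max_len block_size st start_
      = pvBlockB ref_id ref (pvPrefixCounts ref)
          (rest.map (fun p => (p.1, pvDots ref (pvLjust p.2.toList max_len '-'), pvPrefixCounts (pvLjust p.2.toList max_len '-'))))
          max_len block_size st start_ := by
  have hml : 0 ≤ max_len := by rw [← href]; exact Int.natCast_nonneg _
  have hbounds : 0 ≤ start_ ∧ start_ < max_len ∧ 0 < block_size := by
    rcases lt_trichotomy block_size 0 with hbs | hbs | hbs
    · exfalso
      rw [PySem.List.pyRange_of_neg _ _ hbs] at hs
      simp [show ¬(max_len < 0) by omega] at hs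
    · exfalso
      rw [hbs] at hs
      simp [PySem.List.pyRange] at hs
    · have := (PySem.List.mem_pyRange_iff_of_pos hbs start_).mp hs
      exact ⟨this.1, this.2.1, hbs⟩
  obtain ⟨h0, hlt, hbs⟩ := hbounds
  have hse : start_ ≤ min (start_ + block_size) max_len := by omega
  have he : min (start_ + block_size) max_len ≤ max_len := by omega
  have hcnt := pvCountSlice ref start_ (min (start_ + block_size) max_len) h0 hse (by omega)
  have hsubj : ∀ p ∈ rest, ∀ acc : pvStateTy,
      pvSubjA max_len start_ (min (start_ + block_size) max_len)
        (PySem.List.slice ref (some start_) (some (min (start_ + block_size) max_len))) acc p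
      = pvSubjB start_ (min (start_ + block_size) max_len) acc
          (p.1, pvDots ref (pvLjust p.2.toList max_len '-'), pvPrefixCounts (pvLjust p.2.toList max_len '-')) := by
    intro p hp acc
    exact pvSubj_eq max_len start_ _ ref href h0 hse he p (hrest p hp) acc
  simp only [pvBlockA, pvBlockB, PySem.List.len_eq, href, List.foldl_map]
  rw [hcnt, PySem.List.foldl_congr_mem' rest _ _ _ hsubj]
  by_cases hc : st.2.contains ref_id
  · simp only [hc, if_true]
  · have hc' : st.2.contains ref_id = false := by simpa using hc
    simp only [hc, if_false, Bool.false_eq_true,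
      PySem.Dict.getD_insert_self, PySem.Dict.getD_of_not_contains st.2 0 hc',
      PySem.Dict.insert_insert_self]

theorem format_blast_like_alignment_spec' : ∀ (aligned_sequences : List (String × String)) (block_size : Int),
    format_blast_like_alignment aligned_sequences block_size
      = format_blast_like_alignment_alt aligned_sequences block_size := by
  intro aligned block_size
  cases aligned with
  | nil => rfl
  | cons hd rest =>
    obtain ⟨ref_id, ref0⟩ := hd
    simp only [format_blast_like_alignment, format_blast_like_alignment_alt]
    have hM := PySem.List.le_foldl_max (rest.map (fun p => PySem.Str.len p.2)) (PySem.Str.len ref0)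
    set M : Int := (rest.map (fun p => PySem.Str.len p.2)).foldl max (PySem.Str.len ref0) with hMdef
    have h0ref : (0 : Int) ≤ PySem.Str.len ref0 := by rw [PySem.Str.len_eq]; exact Int.natCast_nonneg _
    have hml : 0 ≤ M := le_trans h0ref hM.1
    have href : ((pvLjust ref0.toList M '-').length : Int) = M := by
      simp only [pvLjust, List.length_append, List.length_replicate]
      rw [PySem.Str.len_eq] at hM
      push_cast
      omega
    have hrest : ∀ p ∈ rest, PySem.Str.len p.2 ≤ M := by
      intro p hp
      exact hM.2 _ (List.mem_map_of_mem hp)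
    rw [PySem.List.len_eq, href]
    rw [PySem.List.foldl_congr_mem' _ _ _ _
      (fun s hs acc => pvBlock_eq ref_id (pvLjust ref0.toList M '-') rest M block_size href hrest acc s hs)]

-- ===== VERDICT (by name: the statement is the Claim_ definition above) =====
theorem format_blast_like_alignment_spec : Claim_equal_format_blast_like_alignment := by
  intro aligned_sequences block_size _hdom _hpre
  unfold Spec_format_blast_like_alignment
  exact format_blast_like_alignment_spec' aligned_sequences block_size
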